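-- pv_equiv track=rewrite | github.com/ZZy979/LeetCode | Algorithms/2616/minimizeMax.py | check
-- ===== SOURCE A (Python) =====
-- def check(nums, p, mx):
--     cnt = 0
--     i = 0
--     while i < len(nums) - 1:
--         if nums[i + 1] - nums[i] <= mx:
--             cnt += 1
--             i += 2
--         else:
--             i += 1
--     return cnt >= p
-- ===== SOURCE B (Python) =====
-- def check(nums, p, mx):
--     # DP over prefixes with two rolling scalars: b = max number of disjoint
--     # adjacent pairs with diff <= mx in the prefix seen so far, a = previous b.
--     a = b = 0
--     for x, y in zip(nums, nums[1:]):
--         a, b = b, max(b, a + (1 if y - x <= mx else 0))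
--     return b >= p
-- ===== Notes on version B (the rewrite author's own statement) =====
-- stated objective: alternative
-- what changed: Replaced the index-based greedy skip-2 while-loop by a prefix DP with two rolling scalars (dp[i] = max(dp[i-1], dp[i-2] + pair)), proving greedy left-to-right matching equals the DP maximum on a path.
import Mathlib
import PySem

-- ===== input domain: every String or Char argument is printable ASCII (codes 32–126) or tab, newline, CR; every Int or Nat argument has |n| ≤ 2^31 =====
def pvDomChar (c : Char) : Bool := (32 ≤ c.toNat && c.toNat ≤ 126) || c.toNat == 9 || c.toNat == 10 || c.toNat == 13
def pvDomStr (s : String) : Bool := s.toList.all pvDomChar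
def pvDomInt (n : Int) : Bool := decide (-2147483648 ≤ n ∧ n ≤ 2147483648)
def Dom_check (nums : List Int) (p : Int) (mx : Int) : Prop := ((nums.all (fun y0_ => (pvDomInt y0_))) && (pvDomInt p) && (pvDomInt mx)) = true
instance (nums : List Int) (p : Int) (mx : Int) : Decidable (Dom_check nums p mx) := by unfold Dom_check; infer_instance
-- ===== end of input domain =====

-- B replaces A's greedy skip-2 while-loop by a rolling two-scalar prefix DP (alternative algorithm, same cost).


-- ===== PORT A =====
-- A's while-loop: i scans left to right, taking a pair and skipping 2 when it fits.
-- fuel (= nums.length) only makes the loop total; each iteration advances i by at least 1.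
def checkLoop (nums : List Int) (mx : Int) : Nat → Nat → Nat → Nat
  | 0, _, cnt => cnt
  | fuel + 1, i, cnt =>
    if h : i + 1 < nums.length then
      if nums[i + 1] - nums[i] ≤ mx then
        checkLoop nums mx fuel (i + 2) (cnt + 1)
      else
        checkLoop nums mx fuel (i + 1) cnt
    else cnt

def check (nums : List Int) (p : Int) (mx : Int) : Bool :=
  decide ((checkLoop nums mx nums.length 0 0 : Int) ≥ p)

-- ===== PORT B =====
-- one DP step over an adjacent pair (x, y): (a, b) ↦ (b, max b (a + [y - x ≤ mx]))
def dpStep (mx : Int) (ab : Nat × Nat) (xy : Int × Int) : Nat × Nat :=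
  (ab.2, max ab.2 (ab.1 + (if xy.2 - xy.1 ≤ mx then 1 else 0)))

def check_alt (nums : List Int) (p : Int) (mx : Int) : Bool :=
  decide ((((nums.zip nums.tail).foldl (dpStep mx) (0, 0)).2 : Int) ≥ p)

-- ===== PRECONDITION & SPEC =====
def Spec_check (nums : List Int) (p : Int) (mx : Int) (out : Bool) : Prop := out = check_alt nums p mx
instance (nums : List Int) (p : Int) (mx : Int) (out : Bool) : Decidable (Spec_check nums p mx out) := by unfold Spec_check; infer_instance

-- ===== CLAIM (what is proved, stated in full; the proofs are below) =====
def Claim_equal_check : Prop := ∀ (nums : List Int) (p : Int) (mx : Int), Dom_check nums p mx → Spec_check nums p mx (check nums p mx)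

-- ===== LEMMAS AND PROOFS =====

-- the greedy pair count both programs compute, structurally: the Option carries the pending left element
def greedyAux (mx : Int) : Option Int → List Int → Nat
  | _, [] => 0
  | none, x :: rest => greedyAux mx (some x) rest
  | some x, y :: rest =>
      if y - x ≤ mx then greedyAux mx none rest + 1 else greedyAux mx (some y) rest

theorem greedyAux_cons_cons (mx x y : Int) (rest : List Int) :
    greedyAux mx none (x :: y :: rest)
      = if y - x ≤ mx then greedyAux mx none rest + 1 else greedyAux mx none (y :: rest) := by
  simp [greedyAux]

theorem greedyAux_short (mx : Int) (l : List Int) (hl : l.length ≤ 1) :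
    greedyAux mx none l = 0 := by
  match l with
  | [] => rfl
  | [x] => rfl
  | x :: y :: rest => simp at hl

theorem checkLoop_eq_greedy (nums : List Int) (mx : Int) (fuel i cnt : Nat)
    (hf : nums.length ≤ fuel + i + 1) :
    checkLoop nums mx fuel i cnt = cnt + greedyAux mx none (nums.drop i) := by
  induction fuel generalizing i cnt with
  | zero =>
      rw [checkLoop, greedyAux_short mx _ (by simp; omega)]
      omega
  | succ fuel ih =>
      rw [checkLoop]
      split
      · next h =>
        have hdi : nums.drop i = nums[i] :: nums.drop (i + 1) :=
          List.drop_eq_getElem_cons (by omega)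
        have hdi1 : nums.drop (i + 1) = nums[i + 1] :: nums.drop (i + 2) :=
          List.drop_eq_getElem_cons (by omega)
        conv_rhs => rw [hdi, hdi1]
        rw [greedyAux_cons_cons]
        split
        · next hle => rw [ih (i + 2) (cnt + 1) (by omega)]; omega
        · next hle => rw [ih (i + 1) cnt (by omega), ← hdi1]
      · next h =>
        rw [greedyAux_short mx _ (by simp; omega)]
        omega

theorem dp_eq_greedy (mx : Int) (n : Nat) :
    ∀ l : List Int, l.length ≤ n → ∀ c : Nat,
      ((l.zip l.tail).foldl (dpStep mx) (c, c)).2 = c + greedyAux mx none l := by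
  induction n with
  | zero =>
      intro l hl c
      have : l = [] := by cases l <;> simp_all
      simp [this, greedyAux]
  | succ n ih =>
      intro l hl c
      match l with
      | [] => simp [greedyAux]
      | [x] => simp [greedyAux]
      | x :: y :: rest =>
          rw [greedyAux_cons_cons]
          by_cases hxy : y - x ≤ mx
          · match rest with
            | [] => simp [dpStep, hxy, greedyAux]
            | z :: rest' =>
                have h1 : ((z :: rest').zip rest').foldl (dpStep mx) (c + 1, c + 1)
                    = (((x :: y :: z :: rest').zip (y :: z :: rest')).foldl (dpStep mx) (c, c)) := by
                  by_cases hyz : z - y ≤ mx <;>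
                    simp [dpStep, hxy, hyz]
                have h2 := ih (z :: rest') (by simp at hl ⊢; omega) (c + 1)
                simp only [List.tail_cons] at h2 ⊢
                rw [← h1, h2]
                simp only [hxy, if_pos]
                omega
          · have h1 : ((y :: rest).zip rest).foldl (dpStep mx) (c, c)
                = ((x :: y :: rest).zip (y :: rest)).foldl (dpStep mx) (c, c) := by
              simp [dpStep, hxy]
            have h2 := ih (y :: rest) (by simp at hl ⊢; omega) c
            simp only [List.tail_cons] at h2 ⊢
            rw [← h1, h2]
            simp only [hxy, if_neg, not_false_iff]

-- ===== VERDICT (by name: the statement is the Claim_ definition above) =====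
theorem check_spec : Claim_equal_check := by
  intro nums p mx _
  unfold Spec_check check check_alt
  rw [checkLoop_eq_greedy nums mx nums.length 0 0 (by omega),
      dp_eq_greedy mx nums.length nums le_rfl 0]
  simp
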